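-- pv_equiv track=rewrite | github.com/monegit/algorithm-study | Training-Site/Baekjoon/1/1000/1316/1316.py | check
-- ===== SOURCE A (Python) =====
-- def cut(content: list):
--     arr = content
--     for i in range(len(content)):
--         if arr[0] == 0:
--             del arr[0]
--         elif arr[0] == 1:
--             break
--
--     for i in range(len(content)):
--         if arr[-1] == 0:
--             del arr[-1]
--         elif arr[-1] == 1:
--             break
--     return arr
--
-- def check(content: list):
--     set_content = list(set(content))
--     arr = []
--
--     result = 0
--     for i in range(len(set_content)):
--         for ii in content:
--             if ii == set_content[i]:
--                 arr.append(1)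
--             else:
--                 arr.append(0)
--
--         if sum(arr) == len(cut(arr)):
--             result+=1
--
--         arr = []
--
--     if result == len(set_content):
--         return 1
--     else:
--         return 0
-- ===== SOURCE B (Python) =====
-- def check(content: list):
--     seen = set()
--     prev = None
--     for c in content:
--         if c != prev:
--             if c in seen:
--                 return 0
--             seen.add(c)
--             prev = c
--     return 1
-- ===== Notes on version B (the rewrite author's own statement) =====
-- stated objective: faster
-- what changed: Replaced the per-distinct-value 0/1-mask build plus trim-and-sum contiguity test with a single left-to-right pass that tracks the set of already-started runs and the previous element, returning 0 as soon as a value starts a second run.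
import Mathlib
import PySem

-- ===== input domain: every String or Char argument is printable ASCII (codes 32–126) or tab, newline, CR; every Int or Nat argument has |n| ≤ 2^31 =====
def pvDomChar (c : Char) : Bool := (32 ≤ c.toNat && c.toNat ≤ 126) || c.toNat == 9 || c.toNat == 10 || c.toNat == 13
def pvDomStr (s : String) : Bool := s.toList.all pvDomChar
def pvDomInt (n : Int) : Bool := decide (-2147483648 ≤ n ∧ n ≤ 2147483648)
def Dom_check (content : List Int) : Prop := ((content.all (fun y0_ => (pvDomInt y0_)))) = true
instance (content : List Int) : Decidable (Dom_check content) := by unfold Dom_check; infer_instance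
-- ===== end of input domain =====

-- B replaces A's per-distinct-value mask-and-trim test with one linear pass over the list
-- tracking the set of values whose run has already started (objective: faster, O(n) vs O(n*d)).


-- ===== PORT A =====
-- first loop of cut: 'for i in range(len(content)): if arr[0]==0: del arr[0] elif arr[0]==1: break'
-- (the fuel is the range length; 'arr[0]' on an empty arr would be a Python IndexError — that case
-- is unreachable from check, where arr always contains a 1; the port returns arr there)
def cutFront : Nat → List Int → List Int
  | 0, a => a
  | n + 1, a =>
    match a.head? with
    | none => a
    | some h => if h = 0 then cutFront n a.tail else a

-- second loop of cut, same shape on arr[-1] / del arr[-1]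
def cutBack : Nat → List Int → List Int
  | 0, a => a
  | n + 1, a =>
    match a.getLast? with
    | none => a
    | some h => if h = 0 then cutBack n a.dropLast else a

def cut (a : List Int) : List Int :=
  let a1 := cutFront a.length a
  cutBack a1.length a1

-- list(set(content)) is iterated only to count per-element successes, so the result does not
-- depend on Python's set iteration order; ported as a fold over the distinct elements.
def check (content : List Int) : Int :=
  let set_content : PySem.Set Int := PySem.Set.ofList content
  let result : Int := set_content.foldl (fun r v =>
    let arr : List Int := content.map (fun c => if c = v then (1 : Int) else 0)
    if arr.sum = ((cut arr).length : Int) then r + 1 else r) 0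
  if result = (set_content.length : Int) then 1 else 0

-- ===== PORT B =====
def checkAltLoop : List Int → PySem.Set Int → Option Int → Int
  | [], _, _ => 1
  | c :: rest, seen, prev =>
    if some c ≠ prev then
      if PySem.Set.contains seen c then 0
      else checkAltLoop rest (PySem.Set.add seen c) (some c)
    else checkAltLoop rest seen prev

def check_alt (content : List Int) : Int :=
  checkAltLoop content PySem.Set.empty none

-- ===== PRECONDITION & SPEC =====
def Spec_check (content : List Int) (out : Int) : Prop := out = check_alt content
instance (content : List Int) (out : Int) : Decidable (Spec_check content out) := by unfold Spec_check; infer_instance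

-- ===== CLAIM (what is proved, stated in full; the proofs are below) =====
def Claim_equal_check : Prop := ∀ (content : List Int), Dom_check content → Spec_check content (check content)

-- ===== LEMMAS AND PROOFS =====

-- run heads of a list, given that the previous element was p
def heads (p : Int) : List Int → List Int
  | [] => []
  | c :: t => if c = p then heads p t else c :: heads c t

-- the list condensed to one representative per run
def condense : List Int → List Int
  | [] => []
  | c :: t => c :: heads c t

-- l with its trailing elements ≠ v removed
def rtrim (v : Int) (l : List Int) : List Int :=
  (l.reverse.dropWhile (fun x => x != v)).reverse

-- l restricted to the span from the first v to the last v
def trim (v : Int) (l : List Int) : List Int :=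
  rtrim v (l.dropWhile (fun x => x != v))

-- ---- B side ----

lemma loop_eq (l : List Int) : ∀ (seen : PySem.Set Int) (p : Int),
    checkAltLoop l seen (some p) =
      if (heads p l).Nodup ∧ ∀ c ∈ heads p l, c ∉ seen then 1 else 0 := by
  induction l with
  | nil => intro seen p; simp [checkAltLoop, heads]
  | cons c t ih =>
    intro seen p
    by_cases hc : c = p
    · subst hc
      simpa [checkAltLoop, heads] using ih seen c
    · have hh : heads p (c :: t) = c :: heads c t := by simp [heads, hc]
      rw [hh]
      by_cases hm : c ∈ seen
      · have hcon : PySem.Set.contains seen c = true := (PySem.Set.contains_iff seen c).mpr hm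
        rw [show checkAltLoop (c :: t) seen (some p) = 0 from by simp [checkAltLoop, hc, hm]]
        rw [if_neg]
        rintro ⟨-, hall⟩
        exact hall c List.mem_cons_self hm
      · have hcon : PySem.Set.contains seen c = false := by
          rw [← Bool.not_eq_true, PySem.Set.contains_iff]; exact hm
        rw [show checkAltLoop (c :: t) seen (some p) = checkAltLoop t (seen.add c) (some c) from by
          simp [checkAltLoop, hc, hm]]
        rw [ih]
        have hiff : ((heads c t).Nodup ∧ ∀ d ∈ heads c t, d ∉ seen.add c) ↔
            ((c :: heads c t).Nodup ∧ ∀ d ∈ c :: heads c t, d ∉ seen) := by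
          simp only [List.nodup_cons, PySem.Set.mem_add, List.mem_cons]
          constructor
          · rintro ⟨hnd, hall⟩
            have hcnot : c ∉ heads c t := fun h => (hall c h) (Or.inr rfl)
            refine ⟨⟨hcnot, hnd⟩, ?_⟩
            rintro d (rfl | hd)
            · exact hm
            · exact fun hds => (hall d hd) (Or.inl hds)
          · rintro ⟨⟨hcnot, hnd⟩, hall⟩
            refine ⟨hnd, fun d hd => ?_⟩
            rintro (hds | rfl)
            · exact hall d (Or.inr hd) hds
            · exact hcnot hd
        rw [if_congr hiff rfl rfl]

lemma check_alt_eq (content : List Int) :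
    check_alt content = if (condense content).Nodup then 1 else 0 := by
  cases content with
  | nil => simp [check_alt, checkAltLoop, condense]
  | cons c t =>
    have h0 : PySem.Set.contains (PySem.Set.empty : PySem.Set Int) c = false := rfl
    have hadd : PySem.Set.add (PySem.Set.empty : PySem.Set Int) c = [c] := rfl
    rw [show check_alt (c :: t) = checkAltLoop t ([c] : PySem.Set Int) (some c) from by
      simp [check_alt, checkAltLoop, PySem.Set.empty, PySem.Set.add]]
    rw [loop_eq]
    have hiff : ((heads c t).Nodup ∧ ∀ d ∈ heads c t, d ∉ ([c] : List Int)) ↔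
        (condense (c :: t)).Nodup := by
      simp only [condense, List.nodup_cons, List.mem_singleton]
      constructor
      · rintro ⟨hnd, hall⟩; exact ⟨fun h => (hall c h) rfl, hnd⟩
      · rintro ⟨hcm, hnd⟩; exact ⟨hnd, fun d hd hdc => hcm (hdc ▸ hd)⟩
    rw [if_congr hiff rfl rfl]

-- ---- A side: cut computes the zero-trimmed list ----

lemma cutFront_eq (n : Nat) (a : List Int) (h : a.length ≤ n) :
    cutFront n a = a.dropWhile (fun x => x == 0) := by
  induction n generalizing a with
  | zero =>
    have : a = [] := List.eq_nil_of_length_eq_zero (Nat.le_zero.mp h)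
    subst this
    simp [cutFront]
  | succ n ih =>
    cases a with
    | nil => simp [cutFront]
    | cons x t =>
      by_cases h0 : x = 0
      · subst h0
        rw [show cutFront (n + 1) (0 :: t) = cutFront n t from by simp [cutFront]]
        rw [ih t (by simpa using h)]
        simp [List.dropWhile]
      · rw [show cutFront (n + 1) (x :: t) = x :: t from by simp [cutFront, h0]]
        rw [List.dropWhile_cons, if_neg (by simp [h0])]

lemma cutBack_eq_reverse (n : Nat) (a : List Int) :
    cutBack n a = (cutFront n a.reverse).reverse := by
  induction n generalizing a with
  | zero => simp [cutBack, cutFront]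
  | succ n ih =>
    rw [show cutBack (n + 1) a = (match a.getLast? with
          | none => a
          | some h => if h = 0 then cutBack n a.dropLast else a) from rfl]
    rw [show cutFront (n + 1) a.reverse = (match a.reverse.head? with
          | none => a.reverse
          | some h => if h = 0 then cutFront n a.reverse.tail else a.reverse) from rfl]
    rw [List.head?_reverse]
    cases hh : a.getLast? with
    | none =>
      have : a = [] := by simpa using hh
      simp [this]
    | some x =>
      by_cases hx : x = 0
      · subst hx
        rw [ih, List.tail_reverse]
        simp
      · simp only [if_neg hx, List.reverse_reverse]

lemma cut_eq (a : List Int) :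
    cut a = ((a.dropWhile (fun x => x == 0)).reverse.dropWhile (fun x => x == 0)).reverse := by
  unfold cut
  rw [cutFront_eq _ _ le_rfl, cutBack_eq_reverse, cutFront_eq _ _ (by simp)]

-- ---- A side: the mask commutes with trimming ----

lemma mask_dropWhile (v : Int) (l : List Int) :
    (l.map (fun c => if c = v then (1 : Int) else 0)).dropWhile (fun x => x == 0)
      = (l.dropWhile (fun x => x != v)).map (fun c => if c = v then (1 : Int) else 0) := by
  induction l with
  | nil => simp
  | cons c t ih =>
    by_cases hc : c = v
    · subst hc; simp [List.dropWhile]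
    · simp only [List.map_cons, List.dropWhile_cons]
      rw [if_pos (by simp [hc]), if_pos (by simp [hc]), ih]

lemma cut_mask (v : Int) (l : List Int) :
    cut (l.map (fun c => if c = v then (1 : Int) else 0))
      = (trim v l).map (fun c => if c = v then (1 : Int) else 0) := by
  rw [cut_eq, mask_dropWhile, trim, rtrim, ← List.map_reverse, mask_dropWhile, List.map_reverse]

lemma sum_mask (v : Int) (l : List Int) :
    (l.map (fun c => if c = v then (1 : Int) else 0)).sum = (l.count v : Int) := by
  induction l with
  | nil => simp
  | cons c t ih =>
    by_cases hc : c = v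
    · subst hc; simp [ih]; ring
    · simp [hc, ih]

lemma count_dropWhile_ne (v : Int) (l : List Int) :
    (l.dropWhile (fun x => x != v)).count v = l.count v := by
  induction l with
  | nil => simp
  | cons c t ih =>
    by_cases hc : c = v
    · subst hc; simp [List.dropWhile]
    · rw [List.dropWhile_cons, if_pos (by simpa using hc), ih]
      simp [hc]

lemma count_trim (v : Int) (l : List Int) : (trim v l).count v = l.count v := by
  unfold trim rtrim
  rw [List.count_reverse, count_dropWhile_ne, List.count_reverse, count_dropWhile_ne]

-- A's per-value test says: the trimmed span consists of v's only
lemma test_iff (v : Int) (l : List Int) :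
    ((l.map (fun c => if c = v then (1 : Int) else 0)).sum
        = ((cut (l.map (fun c => if c = v then (1 : Int) else 0))).length : Int))
      ↔ (∀ x ∈ trim v l, x = v) := by
  rw [sum_mask, cut_mask, List.length_map, Nat.cast_inj, ← count_trim v l,
    List.count_eq_length]
  constructor <;> exact fun h x hx => (h x hx).symm

-- ---- run combinatorics ----

lemma count_heads_of_ne (v h : Int) (t : List Int) (hv : h ≠ v) :
    (heads h t).count v = (condense t).count v := by
  cases t with
  | nil => simp [heads, condense]
  | cons c t' =>
    by_cases hc : c = h
    · subst hc
      simp [heads, condense, List.count_cons]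
      exact hv
    · simp [heads, condense, hc]

lemma mem_heads_iff (v : Int) (t : List Int) : ∀ c : Int, c ≠ v → (v ∈ heads c t ↔ v ∈ t) := by
  induction t with
  | nil => simp [heads]
  | cons d r ih =>
    intro c hcv
    by_cases hd : d = c
    · subst hd
      rw [show heads d (d :: r) = heads d r from by simp [heads], ih d hcv, List.mem_cons]
      exact ⟨Or.inr, fun h => h.elim (fun hvc => absurd hvc.symm hcv) id⟩
    · rw [show heads c (d :: r) = d :: heads d r from by simp [heads, hd], List.mem_cons,
        List.mem_cons]
      by_cases hvd : v = d
      · simp [hvd]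
      · simp [ih d (fun h => hvd h.symm), hvd]

lemma mem_condense (v : Int) (l : List Int) : v ∈ condense l ↔ v ∈ l := by
  cases l with
  | nil => simp [condense]
  | cons c t =>
    simp only [condense, List.mem_cons]
    by_cases hvc : v = c
    · simp [hvc]
    · simp [mem_heads_iff v t c (fun h => hvc h.symm), hvc]

lemma rtrim_cons_self (v : Int) (t : List Int) : rtrim v (v :: t) = v :: rtrim v t := by
  unfold rtrim
  rw [List.reverse_cons, List.dropWhile_append]
  simp [List.dropWhile]

lemma rtrim_all_iff (v : Int) (t : List Int) :
    (∀ x ∈ rtrim v t, x = v) ↔ v ∉ heads v t := by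
  induction t with
  | nil => simp [rtrim, heads]
  | cons c t' ih =>
    by_cases hc : c = v
    · subst hc
      rw [rtrim_cons_self, show heads c (c :: t') = heads c t' from by simp [heads], ← ih]
      constructor
      · exact fun h x hx => h x (List.mem_cons_of_mem _ hx)
      · intro h x hx
        rcases List.mem_cons.mp hx with rfl | hx
        · rfl
        · exact h x hx
    · rw [show heads v (c :: t') = c :: heads c t' from by simp [heads, hc]]
      by_cases hvt : v ∈ t'
      · have hne : ¬(t'.reverse.dropWhile (fun x => x != v)).isEmpty = true := by
          rw [List.isEmpty_iff, List.dropWhile_eq_nil_iff]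
          push Not
          exact ⟨v, by simpa using hvt, by simp⟩
        have hr : rtrim v (c :: t') = c :: rtrim v t' := by
          unfold rtrim
          rw [List.reverse_cons, List.dropWhile_append, if_neg hne]
          simp
        rw [hr]
        refine iff_of_false (fun h => hc (h c List.mem_cons_self)) (fun h => h ?_)
        exact List.mem_cons_of_mem _ ((mem_heads_iff v t' c hc).mpr hvt)
      · have hall : t'.reverse.dropWhile (fun x => x != v) = [] := by
          rw [List.dropWhile_eq_nil_iff]
          intro x hx
          simp only [bne_iff_ne, ne_eq]
          rintro rfl
          exact hvt (by simpa using hx)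
        have hr : rtrim v (c :: t') = [] := by
          unfold rtrim
          have hcv : (c != v) = true := by simpa using hc
          rw [List.reverse_cons, List.dropWhile_append, if_pos (by simp [hall])]
          simp [List.dropWhile, hcv]
        rw [hr]
        refine iff_of_true (by simp) ?_
        rw [List.mem_cons]
        push Not
        exact ⟨fun h => hc h.symm, fun h => hvt ((mem_heads_iff v t' c hc).mp h)⟩

lemma trim_all_iff_count_one (v : Int) (l : List Int) (hv : v ∈ l) :
    (∀ x ∈ trim v l, x = v) ↔ (condense l).count v = 1 := by
  induction l with
  | nil => simp at hv
  | cons h t ih =>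
    by_cases hh : h = v
    · subst hh
      have ht : trim h (h :: t) = h :: rtrim h t := by
        rw [trim, show (h :: t).dropWhile (fun x => x != h) = h :: t from by
          simp [List.dropWhile], rtrim_cons_self]
      have hcnt : (condense (h :: t)).count h = (heads h t).count h + 1 := by
        simp [condense]
      rw [ht, hcnt]
      constructor
      · intro hall
        rw [List.count_eq_zero.mpr
          ((rtrim_all_iff h t).mp (fun x hx => hall x (List.mem_cons_of_mem _ hx)))]
      · intro hone
        have hnm : h ∉ heads h t := List.count_eq_zero.mp (by omega)
        have := (rtrim_all_iff h t).mpr hnm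
        intro x hx
        rcases List.mem_cons.mp hx with rfl | hx
        · rfl
        · exact this x hx
    · have hvt : v ∈ t := by
        rcases List.mem_cons.mp hv with rfl | hmt
        · exact absurd rfl hh
        · exact hmt
      have htrim : trim v (h :: t) = trim v t := by
        rw [trim, trim, List.dropWhile_cons, if_pos (by simpa using hh)]
      rw [htrim, ih hvt]
      have hvh : v ≠ h := fun e => hh e.symm
      have : (condense (h :: t)).count v = (condense t).count v := by
        have h1 := count_heads_of_ne v h t hh
        simp [condense, hh, h1]
      rw [this]

lemma nodup_condense_iff (l : List Int) :
    (condense l).Nodup ↔ ∀ v ∈ l, (condense l).count v = 1 := by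
  constructor
  · intro hnd v hv
    have h1 : (condense l).count v ≤ 1 := List.nodup_iff_count.mp hnd v
    have h2 : 0 < (condense l).count v := List.count_pos_iff.mpr ((mem_condense v l).mpr hv)
    omega
  · intro h
    rw [List.nodup_iff_count]
    intro a
    by_cases ha : a ∈ condense l
    · exact le_of_eq (h a ((mem_condense a l).mp ha))
    · rw [List.count_eq_zero.mpr ha]
      simp

-- ---- putting A together ----

lemma check_eq (content : List Int) :
    check content = if (condense content).Nodup then 1 else 0 := by
  unfold check
  rw [show (fun (r : Int) v =>
        let arr := content.map (fun c => if c = v then (1 : Int) else 0)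
        if arr.sum = ((cut arr).length : Int) then r + 1 else r)
      = (fun (r : Int) v =>
        if (fun v => decide ((content.map (fun c => if c = v then (1 : Int) else 0)).sum
            = ((cut (content.map (fun c => if c = v then (1 : Int) else 0))).length : Int))) v
            = true
        then r + 1 else r) from by funext r v; simp]
  dsimp only
  rw [PySem.List.foldl_count_if, zero_add]
  refine if_congr ?_ rfl rfl
  rw [Nat.cast_inj, List.countP_eq_length, nodup_condense_iff]
  constructor
  · intro h v hv
    have := h v ((PySem.Set.mem_ofList content v).mpr hv)
    rw [decide_eq_true_eq, test_iff] at this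
    exact (trim_all_iff_count_one v content hv).mp this
  · intro h v hv
    have hvc : v ∈ content := (PySem.Set.mem_ofList content v).mp hv
    rw [decide_eq_true_eq, test_iff]
    exact (trim_all_iff_count_one v content hvc).mpr (h v hvc)

-- ===== VERDICT (by name: the statement is the Claim_ definition above) =====
theorem check_spec : Claim_equal_check := by
  intro content _
  unfold Spec_check
  rw [check_eq, check_alt_eq]
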